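-- pv_equiv track=rewrite | github.com/SauersML/WatcherBench | analyze_openai.py | would_benchmark_match
-- ===== SOURCE A (Python) =====
-- def would_benchmark_match(token_str: str, target: str) -> bool:
--     """Reproduce the benchmark's extract_logprob_for_token matching logic."""
--     base_forms = {target, target.lower(), target.capitalize(), target.upper()}
--     variants = set()
--     for form in base_forms:
--         variants.add(form)
--         variants.add(" " + form)
--         variants.add(form + ".")
--         variants.add(" " + form + ".")
--         variants.add(">" + form)
--         variants.add("\t" + form)
--     return token_str in variants
-- ===== SOURCE B (Python) =====
-- def would_benchmark_match(token_str: str, target: str) -> bool: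
--     """Strip-and-check: instead of enumerating all affixed variants, strip each
--     of the six (prefix, suffix) affix pairs off token_str and test the core."""
--     base_forms = {target, target.lower(), target.capitalize(), target.upper()}
--     for prefix, suffix in (("", ""), (" ", ""), ("", "."), (" ", "."), (">", ""), ("\t", "")):
--         if token_str.startswith(prefix) and token_str.endswith(suffix):
--             core = token_str[len(prefix):len(token_str) - len(suffix)]
--             if core in base_forms:
--                 return True
--     return False
-- ===== Notes on version B (the rewrite author's own statement) =====
-- stated objective: faster
-- what changed: B strips each of the six (prefix, suffix) affix pairs off token_str and tests the remaining core against the four base forms, instead of A's building of the full up-to-24-element variants set followed by one membership test.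
import Mathlib
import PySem

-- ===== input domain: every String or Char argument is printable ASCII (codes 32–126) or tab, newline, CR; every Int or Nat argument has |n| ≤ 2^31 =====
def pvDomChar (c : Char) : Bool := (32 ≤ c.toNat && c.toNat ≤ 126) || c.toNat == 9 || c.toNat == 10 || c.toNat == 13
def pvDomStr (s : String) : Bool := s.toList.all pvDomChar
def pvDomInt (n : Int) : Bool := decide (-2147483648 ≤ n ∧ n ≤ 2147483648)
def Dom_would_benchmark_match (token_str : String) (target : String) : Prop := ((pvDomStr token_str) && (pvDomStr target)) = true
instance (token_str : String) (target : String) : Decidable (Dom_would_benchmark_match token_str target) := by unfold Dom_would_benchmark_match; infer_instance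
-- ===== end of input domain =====

-- B strips each of six (prefix, suffix) affix pairs off token_str and tests the core against the
-- four base forms, instead of A's generate-all-variants set plus membership test (alternative).


-- shared helper: Python str.capitalize() (exact on ASCII: first char uppercased, rest lowercased)
def pvCapitalize : List Char → List Char
  | [] => []
  | c :: cs => PySem.Chars.upperChar c :: PySem.Chars.lower cs

-- shared helper: the base_forms set {target, target.lower(), target.capitalize(), target.upper()}
-- (built identically by both Pythons)
def pvBaseForms (t : List Char) : PySem.Set (List Char) :=
  PySem.Set.ofList [t, PySem.Chars.lower t, pvCapitalize t, PySem.Chars.upper t]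

-- ===== PORT A =====
-- the six variants A adds for one form (loop body of 'for form in base_forms')
def pvVariantsAdd (v : PySem.Set (List Char)) (f : List Char) : PySem.Set (List Char) :=
  PySem.Set.add (PySem.Set.add (PySem.Set.add (PySem.Set.add (PySem.Set.add
    (PySem.Set.add v f) (' ' :: f)) (f ++ ['.'])) (' ' :: (f ++ ['.']))) ('>' :: f)) ('\t' :: f)

def would_benchmark_match (token_str : String) (target : String) : Bool :=
  let base_forms := pvBaseForms target.toList
  let variants := base_forms.foldl pvVariantsAdd PySem.Set.empty
  PySem.Set.contains variants token_str.toList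

-- ===== PORT B =====
def pvAffixes : List (List Char × List Char) :=
  [([], []), ([' '], []), ([], ['.']), ([' '], ['.']), (['>'], []), (['\t'], [])]

-- core = token_str[len(prefix) : len(token_str) - len(suffix)]
def pvCore (s : List Char) (pr : List Char × List Char) : List Char :=
  PySem.List.slice s (some (pr.1.length : Int)) (some ((s.length : Int) - (pr.2.length : Int)))

def would_benchmark_match_alt (token_str : String) (target : String) : Bool :=
  let s := token_str.toList
  let base_forms := pvBaseForms target.toList
  pvAffixes.any (fun pr =>
    PySem.Chars.startswith s pr.1 && PySem.Chars.endswith s pr.2 &&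
      PySem.Set.contains base_forms (pvCore s pr))

-- ===== PRECONDITION & SPEC =====
def Spec_would_benchmark_match (token_str : String) (target : String) (out : Bool) : Prop := out = would_benchmark_match_alt token_str target
instance (token_str : String) (target : String) (out : Bool) : Decidable (Spec_would_benchmark_match token_str target out) := by unfold Spec_would_benchmark_match; infer_instance

-- ===== CLAIM (what is proved, stated in full; the proofs are below) =====
def Claim_equal_would_benchmark_match : Prop := ∀ (token_str : String) (target : String), Dom_would_benchmark_match token_str target → Spec_would_benchmark_match token_str target (would_benchmark_match token_str target)

-- ===== LEMMAS AND PROOFS =====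

-- the six variants A generates from a form f, as a list
def pvVariantList (f : List Char) : List (List Char) :=
  [f, ' ' :: f, f ++ ['.'], ' ' :: (f ++ ['.']), '>' :: f, '\t' :: f]

theorem pv_mem_variantsAdd (tk f : List Char) (v : PySem.Set (List Char)) :
    tk ∈ pvVariantsAdd v f ↔ tk ∈ v ∨ tk ∈ pvVariantList f := by
  simp [pvVariantsAdd, pvVariantList, PySem.Set.mem_add]
  tauto

theorem pv_mem_foldl_variants (tk : List Char) (l : List (List Char)) (v : PySem.Set (List Char)) :
    tk ∈ l.foldl pvVariantsAdd v ↔ tk ∈ v ∨ ∃ f ∈ l, tk ∈ pvVariantList f := by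
  induction l generalizing v with
  | nil => simp
  | cons g gs ih =>
      simp [List.foldl_cons, ih, pv_mem_variantsAdd]
      tauto

theorem pv_mem_variantList_iff (tk f : List Char) :
    tk ∈ pvVariantList f ↔ ∃ pr ∈ pvAffixes, tk = pr.1 ++ f ++ pr.2 := by
  simp [pvVariantList, pvAffixes]

theorem pv_core_append (p f s : List Char) : pvCore (p ++ f ++ s) (p, s) = f := by
  have hb : (0 : Int) ≤ ((p ++ f ++ s).length : Int) - (s.length : Int) := by
    simp [List.length_append]; omega
  show PySem.List.slice (p ++ f ++ s) (some (p.length : Int))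
      (some (((p ++ f ++ s).length : Int) - (s.length : Int))) = f
  rw [PySem.List.slice_toNat _ (Int.natCast_nonneg _) hb]
  have hc : (((p ++ f ++ s).length : Int) - (s.length : Int)).toNat - ((p.length : Int)).toNat
      = f.length := by
    simp [List.length_append]; omega
  rw [hc, Int.toNat_natCast, List.append_assoc, List.drop_left]
  exact List.take_left

theorem pv_core_complete (p s tk : List Char) (h1 : p <+: tk) (h2 : s <:+ tk)
    (hlen : p.length + s.length ≤ tk.length) : tk = p ++ pvCore tk (p, s) ++ s := by
  obtain ⟨r, rfl⟩ := h1
  have hs : s <:+ r := by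
    have hr : r <:+ p ++ r := List.suffix_append p r
    exact List.suffix_of_suffix_length_le h2 hr (by simp at hlen ⊢; omega)
  obtain ⟨m, rfl⟩ := hs
  have := pv_core_append p m s
  rw [List.append_assoc] at this ⊢
  rw [this]

theorem pv_hlen (pr : List Char × List Char) (tk : List Char) (hpr : pr ∈ pvAffixes)
    (h1 : pr.1 <+: tk) (h2 : pr.2 <:+ tk) : pr.1.length + pr.2.length ≤ tk.length := by
  have l1 := h1.length_le
  have l2 := h2.length_le
  simp [pvAffixes] at hpr
  rcases hpr with h | h | h | h | h | h <;> subst h <;> simp_all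
  -- remaining case: pr = ([' '], ['.'])
  obtain ⟨u, rfl⟩ := h2
  cases u with
  | nil => rcases h1 with ⟨w, hw⟩; simp at hw
  | cons a us => simp

theorem pv_main (tk t : List Char) :
    PySem.Set.contains ((pvBaseForms t).foldl pvVariantsAdd PySem.Set.empty) tk =
      pvAffixes.any (fun pr =>
        PySem.Chars.startswith tk pr.1 && PySem.Chars.endswith tk pr.2 &&
          PySem.Set.contains (pvBaseForms t) (pvCore tk pr)) := by
  rw [Bool.eq_iff_iff]
  rw [PySem.Set.contains_iff, List.any_eq_true]
  rw [pv_mem_foldl_variants]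
  simp only [PySem.Set.empty, List.not_mem_nil, false_or]
  constructor
  · rintro ⟨f, hf, hmem⟩
    rw [pv_mem_variantList_iff] at hmem
    obtain ⟨pr, hpr, rfl⟩ := hmem
    refine ⟨pr, hpr, ?_⟩
    have hsw : PySem.Chars.startswith (pr.1 ++ f ++ pr.2) pr.1 = true := by
      rw [PySem.Chars.startswith_iff, List.append_assoc]; exact List.prefix_append _ _
    have hew : PySem.Chars.endswith (pr.1 ++ f ++ pr.2) pr.2 = true := by
      rw [PySem.Chars.endswith_iff]; exact List.suffix_append _ _
    have hcore : pvCore (pr.1 ++ f ++ pr.2) pr = f := pv_core_append pr.1 f pr.2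
    rw [hsw, hew, hcore]
    simp only [Bool.true_and]
    rw [PySem.Set.contains_iff]
    exact hf
  · rintro ⟨pr, hpr, hcond⟩
    simp only [Bool.and_eq_true] at hcond
    obtain ⟨⟨hsw, hew⟩, hcontains⟩ := hcond
    rw [PySem.Chars.startswith_iff] at hsw
    rw [PySem.Chars.endswith_iff] at hew
    have hlen := pv_hlen pr tk hpr hsw hew
    have htk : tk = pr.1 ++ pvCore tk pr ++ pr.2 := pv_core_complete pr.1 pr.2 tk hsw hew hlen
    refine ⟨pvCore tk pr, ?_, ?_⟩
    · rw [PySem.Set.contains_iff] at hcontains; exact hcontains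
    · rw [pv_mem_variantList_iff]
      exact ⟨pr, hpr, htk⟩

-- ===== VERDICT (by name: the statement is the Claim_ definition above) =====
theorem would_benchmark_match_spec : Claim_equal_would_benchmark_match := by
  intro token_str target _
  unfold Spec_would_benchmark_match would_benchmark_match would_benchmark_match_alt
  exact pv_main token_str.toList target.toList
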